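-- pv_equiv track=rewrite | github.com/cholandy/algorithms | Algorithm and Data Structure/Baekjoon/1000번대/01000번대/01039번 교환/boj1039_cubelover.py | f
-- ===== SOURCE A (Python) =====
-- def f(a,n):
--     if not n or a[0]=='0':
--         return a
--     r=['0']
--     for i in range(len(a)):
--         for j in range(i):
--             a[i],a[j]=a[j],a[i]
--             t=f(a[:],n-1)
--             a[i],a[j]=a[j],a[i]
--             if t>r:
--                 r=t
--     return r
-- ===== SOURCE B (Python) =====
-- def f(a, n):
--     memo = {}
--
--     def go(t, m):
--         if not m or t[0] == '0':
--             return list(t)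
--         key = (t, m)
--         if key in memo:
--             return memo[key]
--         r = ['0']
--         for i in range(len(t)):
--             for j in range(i):
--                 s = list(t)
--                 s[i], s[j] = s[j], s[i]
--                 v = go(tuple(s), m - 1)
--                 if v > r:
--                     r = v
--         memo[key] = r
--         return r
--
--     return go(tuple(a), n)
-- ===== Notes on version B (the rewrite author's own statement) =====
-- stated objective: alternative
-- what changed: B turns A's naive recursion into dynamic programming: a memo dict keyed by (arrangement, remaining swaps), so each state is computed once instead of once per path reaching it.
import Mathlib
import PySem

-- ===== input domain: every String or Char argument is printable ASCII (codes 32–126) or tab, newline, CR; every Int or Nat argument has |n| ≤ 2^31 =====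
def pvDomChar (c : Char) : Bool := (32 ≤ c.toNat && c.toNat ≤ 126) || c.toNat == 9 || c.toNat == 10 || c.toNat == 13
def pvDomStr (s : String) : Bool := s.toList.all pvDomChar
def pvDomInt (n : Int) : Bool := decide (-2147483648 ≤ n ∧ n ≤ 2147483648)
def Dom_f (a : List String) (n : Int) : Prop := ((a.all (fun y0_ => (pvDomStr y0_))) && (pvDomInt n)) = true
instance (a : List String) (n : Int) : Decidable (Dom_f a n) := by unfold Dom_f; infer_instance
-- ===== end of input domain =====

-- B replaces A's naive recursion by dynamic programming: a memo dict on (arrangement, remaining-swaps) states (objective: alternative).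
-- A mutates `a` during its loop but restores it before returning; net effect none, equivalence is about the return value.


-- Python's `t > r` on lists of strings: lexicographic, element strings by code points
def pyListLt : List String → List String → Bool
  | _, [] => false
  | [], _ :: _ => true
  | x :: xs, y :: ys => if x < y then true else if x = y then pyListLt xs ys else false

-- a[i],a[j] = a[j],a[i] (both indices in range wherever used)
def swapIJ (a : List String) (i j : Nat) : List String :=
  (a.set i (a.getD j "")).set j (a.getD i "")

-- ===== PORT A =====
-- fuel = n.toNat makes the recursion (which decrements n) structural; the fuel-0 fallback is only
-- reached when n ≤ 0, where the Python either returns a / ['0'] without recursing or diverges.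
def fA : Nat → List String → Int → List String
  | 0, a, n => if n = 0 ∨ a.head? = some "0" then a else ["0"]
  | fuel + 1, a, n =>
    if n = 0 ∨ a.head? = some "0" then a
    else
      (List.range a.length).foldl (fun r i =>
        (List.range i).foldl (fun r j =>
          let t := fA fuel (swapIJ a i j) (n - 1)
          if pyListLt r t then t else r) r) ["0"]

def f (a : List String) (n : Int) : List String := fA n.toNat a n

-- ===== PORT B =====
-- go threads the memo dict through the computation and returns (value, memo)
def goB : Nat → List String → Int → PySem.Dict (List String × Int) (List String) →
    (List String × PySem.Dict (List String × Int) (List String))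
  | 0, t, n, memo =>
    if n = 0 ∨ t.head? = some "0" then (t, memo)
    else
      match memo.get? (t, n) with
      | some v => (v, memo)
      | none => (["0"], memo)
  | fuel + 1, t, n, memo =>
    if n = 0 ∨ t.head? = some "0" then (t, memo)
    else
      match memo.get? (t, n) with
      | some v => (v, memo)
      | none =>
        let st := (List.range t.length).foldl (fun st i =>
          (List.range i).foldl (fun (st : List String × PySem.Dict (List String × Int) (List String)) j =>
            let p := goB fuel (swapIJ t i j) (n - 1) st.2
            (if pyListLt st.1 p.1 then p.1 else st.1, p.2)) st) (["0"], memo)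
        (st.1, st.2.insert (t, n) st.1)

def f_alt (a : List String) (n : Int) : List String := (goB n.toNat a n PySem.Dict.empty).1

-- ===== PRECONDITION & SPEC =====
-- Pre_ excludes: a = [] with n ≠ 0 (a[0] raises IndexError), and n < 0 with len(a) ≥ 2 and a[0] ≠ '0'
-- (the recursion decrements n past 0 and never terminates).
def Pre_f (a : List String) (n : Int) : Prop :=
  (n ≠ 0 → a ≠ []) ∧ (0 ≤ n ∨ a.head? = some "0" ∨ a.length ≤ 1)
instance (a : List String) (n : Int) : Decidable (Pre_f a n) := by unfold Pre_f; infer_instance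
def pvWitness_f : List String × Int := (["2", "1"], 1)

def Spec_f (a : List String) (n : Int) (out : List String) : Prop := out = f_alt a n
instance (a : List String) (n : Int) (out : List String) : Decidable (Spec_f a n out) := by unfold Spec_f; infer_instance

-- ===== CLAIM (what is proved, stated in full; the proofs are below) =====
def Claim_equal_f : Prop := ∀ (a : List String) (n : Int), Dom_f a n → Pre_f a n → Spec_f a n (f a n)

-- ===== LEMMAS AND PROOFS =====

-- memo invariant: every stored value is the true value of its state
def MemoInv (memo : PySem.Dict (List String × Int) (List String)) : Prop :=
  ∀ t m v, memo.get? (t, m) = some v → v = fA m.toNat t m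

-- a fold threading (best, memo) computes, in its first component, the plain fold on best,
-- provided each step does so and preserves the invariant on the second component
theorem foldl_pair {α : Type}
    (SB : (List String × PySem.Dict (List String × Int) (List String)) → α →
          (List String × PySem.Dict (List String × Int) (List String)))
    (SA : List String → α → List String)
    (h : ∀ st x, MemoInv st.2 → (SB st x).1 = SA st.1 x ∧ MemoInv (SB st x).2) :
    ∀ (L : List α) st, MemoInv st.2 →
      (L.foldl SB st).1 = L.foldl SA st.1 ∧ MemoInv (L.foldl SB st).2 := by
  intro L
  induction L with
  | nil => intro st hst; exact ⟨rfl, hst⟩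
  | cons x xs IH =>
    intro st hst
    obtain ⟨h1, h2⟩ := h st x hst
    obtain ⟨h3, h4⟩ := IH (SB st x) h2
    simp only [List.foldl_cons]
    exact ⟨by rw [h3, h1], h4⟩

theorem goB_correct : ∀ (fuel : Nat) (t : List String) (n : Int) memo,
    0 ≤ n → n.toNat ≤ fuel → MemoInv memo →
    (goB fuel t n memo).1 = fA n.toNat t n ∧ MemoInv (goB fuel t n memo).2 := by
  intro fuel
  induction fuel with
  | zero =>
    intro t n memo hn hf hmem
    have hn0 : n = 0 := by omega
    subst hn0
    simp [goB, fA, hmem]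
  | succ k IH =>
    intro t n memo hn hf hmem
    by_cases hc : n = 0 ∨ t.head? = some "0"
    · have hA : fA n.toNat t n = t := by
        cases h : n.toNat <;> simp only [fA, if_pos hc]
      simp only [goB, if_pos hc]
      exact ⟨hA.symm, hmem⟩
    · have hn1 : 1 ≤ n := by
        rcases lt_or_eq_of_le hn with h | h
        · omega
        · exact absurd h.symm (fun hh => hc (Or.inl hh))
      have hnt : n.toNat = (n - 1).toNat + 1 := by omega
      have hA : fA n.toNat t n =
          (List.range t.length).foldl (fun r i =>
            (List.range i).foldl (fun r j =>
              let u := fA (n - 1).toNat (swapIJ t i j) (n - 1)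
              if pyListLt r u then u else r) r) ["0"] := by
        rw [hnt]; simp only [fA, if_neg hc]
      cases hget : memo.get? (t, n) with
      | some v =>
        refine ⟨?_, ?_⟩
        · simp only [goB, if_neg hc, hget]
          exact hmem t n v hget
        · simp only [goB, if_neg hc, hget]
          exact hmem
      | none =>
        -- one inner-fold step is correct
        have hstep : ∀ (i : Nat)
            (st : List String × PySem.Dict (List String × Int) (List String)) (j : Nat),
            MemoInv st.2 →
            ((fun (st : List String × PySem.Dict (List String × Int) (List String)) j =>
              let p := goB k (swapIJ t i j) (n - 1) st.2
              (if pyListLt st.1 p.1 then p.1 else st.1, p.2)) st j).1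
              = (fun (r : List String) (j : Nat) =>
                  let u := fA (n - 1).toNat (swapIJ t i j) (n - 1)
                  if pyListLt r u then u else r) st.1 j ∧
            MemoInv ((fun (st : List String × PySem.Dict (List String × Int) (List String)) j =>
              let p := goB k (swapIJ t i j) (n - 1) st.2
              (if pyListLt st.1 p.1 then p.1 else st.1, p.2)) st j).2 := by
          intro i st j hst
          obtain ⟨h1, h2⟩ := IH (swapIJ t i j) (n - 1) st.2 (by omega) (by omega) hst
          constructor
          · simp only [h1]
          · exact h2
        -- outer-fold step is correct (via foldl_pair on the inner fold)
        have houter : ∀ (st : List String × PySem.Dict (List String × Int) (List String)) (i : Nat),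
            MemoInv st.2 →
            ((fun st i => (List.range i).foldl
              (fun (st : List String × PySem.Dict (List String × Int) (List String)) j =>
                let p := goB k (swapIJ t i j) (n - 1) st.2
                (if pyListLt st.1 p.1 then p.1 else st.1, p.2)) st) st i).1
              = (fun (r : List String) (i : Nat) =>
                  (List.range i).foldl (fun r j =>
                    let u := fA (n - 1).toNat (swapIJ t i j) (n - 1)
                    if pyListLt r u then u else r) r) st.1 i ∧
            MemoInv ((fun st i => (List.range i).foldl
              (fun (st : List String × PySem.Dict (List String × Int) (List String)) j =>
                let p := goB k (swapIJ t i j) (n - 1) st.2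
                (if pyListLt st.1 p.1 then p.1 else st.1, p.2)) st) st i).2 := by
          intro st i hst
          exact foldl_pair _ _ (hstep i) (List.range i) st hst
        have hmain := foldl_pair
          (fun st i => (List.range i).foldl
            (fun (st : List String × PySem.Dict (List String × Int) (List String)) j =>
              let p := goB k (swapIJ t i j) (n - 1) st.2
              (if pyListLt st.1 p.1 then p.1 else st.1, p.2)) st)
          (fun (r : List String) (i : Nat) =>
            (List.range i).foldl (fun r j =>
              let u := fA (n - 1).toNat (swapIJ t i j) (n - 1)
              if pyListLt r u then u else r) r)
          houter (List.range t.length) (["0"], memo) hmem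
        refine ⟨?_, ?_⟩
        · simp only [goB, if_neg hc, hget]
          rw [hA]
          exact hmain.1
        · simp only [goB, if_neg hc, hget]
          intro t' m' v' hv'
          rw [PySem.Dict.get?_insert] at hv'
          by_cases hk : (t', m') = (t, n)
          · rw [if_pos hk] at hv'
            obtain ⟨rfl, rfl⟩ := Prod.mk.injEq .. ▸ hk
            have hv := Option.some_inj.mp hv'
            rw [hA, ← hv]
            exact hmain.1
          · rw [if_neg hk] at hv'
            exact hmain.2 t' m' v' hv'

theorem memoInv_empty : MemoInv PySem.Dict.empty := by
  intro t m v hv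
  simp [PySem.Dict.get?_empty] at hv

-- ===== VERDICT (by name: the statement is the Claim_ definition above) =====
theorem f_spec : Claim_equal_f := by
  unfold Claim_equal_f
  intro a n _ hpre
  unfold Spec_f f f_alt
  obtain ⟨hne, hdeg⟩ := hpre
  by_cases hn : 0 ≤ n
  · exact ((goB_correct n.toNat a n PySem.Dict.empty hn le_rfl memoInv_empty).1).symm
  · push Not at hn
    have hnt : n.toNat = 0 := by omega
    rw [hnt]
    have hne' : a ≠ [] := hne (by omega)
    have hn0 : ¬ n = 0 := by omega
    rcases hdeg with h | h | h
    · omega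
    · simp [fA, goB, h, hn0]
    · obtain ⟨x, hx⟩ : ∃ x, a = [x] := by
        cases a with
        | nil => exact absurd rfl hne'
        | cons y ys => cases ys with
          | nil => exact ⟨y, rfl⟩
          | cons z zs => simp at h
      subst hx
      by_cases hx0 : x = "0"
      · simp [fA, goB, hx0, hn0]
      · simp [fA, goB, hx0, hn0, PySem.Dict.get?_empty]
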